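-- pv_equiv track=rewrite | github.com/Metaheurist/Aquaduct | src/model_integrity_cache.py | worst_integrity_status
-- ===== SOURCE A (Python) =====
-- _INTEGRITY_RANK = (
--     "error",
--     "missing_and_corrupt",
--     "corrupt",
--     "missing",
--     "ok",
-- )
--
-- def worst_integrity_status(states: list[str]) -> str:
--     """
--     Pick the worst label among non-empty states (for script/video/voice rows that pull multiple repos).
--     Unknown / unseen states are ignored if at least one known state exists.
--     """
--     rank = {s: i for i, s in enumerate(_INTEGRITY_RANK)}
--     best_i = 999
--     worst = "ok"
--     for s in states:
--         s = str(s).strip()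
--         if s not in rank:
--             continue
--         i = rank[s]
--         if i < best_i:
--             best_i = i
--             worst = s
--     return worst if best_i < 999 else ""
-- ===== SOURCE B (Python) =====
-- _INTEGRITY_RANK = (
--     "error",
--     "missing_and_corrupt",
--     "corrupt",
--     "missing",
--     "ok",
-- )
--
-- def worst_integrity_status(states: list[str]) -> str:
--     present = {str(s).strip() for s in states}
--     for label in _INTEGRITY_RANK:
--         if label in present:
--             return label
--     return ""
-- ===== Notes on version B (the rewrite author's own statement) =====
-- stated objective: simpler
-- what changed: Instead of scanning states with a running-minimum (best_i, worst) accumulator against a rank dict, B builds a set of stripped states once and walks the fixed worst-to-best label tuple, returning the first label present.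
import Mathlib
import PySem

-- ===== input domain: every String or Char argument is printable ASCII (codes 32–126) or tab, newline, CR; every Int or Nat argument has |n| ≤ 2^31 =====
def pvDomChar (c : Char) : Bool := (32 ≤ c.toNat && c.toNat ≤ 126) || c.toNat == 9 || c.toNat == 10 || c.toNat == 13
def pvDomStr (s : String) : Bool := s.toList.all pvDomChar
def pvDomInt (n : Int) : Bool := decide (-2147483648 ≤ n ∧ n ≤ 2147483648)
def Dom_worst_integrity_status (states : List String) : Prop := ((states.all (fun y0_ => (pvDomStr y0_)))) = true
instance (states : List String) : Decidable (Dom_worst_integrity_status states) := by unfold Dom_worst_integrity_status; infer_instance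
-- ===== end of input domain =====

-- B builds the set of stripped states once and walks the fixed worst-to-best label tuple,
-- returning the first label present, instead of A's running-minimum scan over states (objective: simpler).

-- ===== PORT A =====
-- module-level constant _INTEGRITY_RANK
def pvLabs : List String := ["error", "missing_and_corrupt", "corrupt", "missing", "ok"]

-- rank = {s: i for i, s in enumerate(_INTEGRITY_RANK)}
def pvRank : PySem.Dict String Int :=
  (PySem.List.enumerate pvLabs).foldl (fun d p => d.insert p.2 p.1) PySem.Dict.empty

def worst_integrity_status (states : List String) : String :=
  let r := states.foldl (fun (acc : Int × String) s =>
    let s' := PySem.Str.strip s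
    match pvRank.get? s' with
    | none => acc                                   -- continue
    | some i => if i < acc.1 then (i, s') else acc) (999, "ok")
  if r.1 < 999 then r.2 else ""

-- ===== PORT B =====
def worst_integrity_status_alt (states : List String) : String :=
  let present : PySem.Set String := PySem.Set.ofList (states.map (fun s => PySem.Str.strip s))
  match pvLabs.find? (fun label => PySem.Set.contains present label) with
  | some label => label
  | none => ""

-- ===== PRECONDITION & SPEC =====
def Spec_worst_integrity_status (states : List String) (out : String) : Prop := out = worst_integrity_status_alt states
instance (states : List String) (out : String) : Decidable (Spec_worst_integrity_status states out) := by unfold Spec_worst_integrity_status; infer_instance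

-- ===== CLAIM (what is proved, stated in full; the proofs are below) =====
def Claim_equal_worst_integrity_status : Prop := ∀ (states : List String), Dom_worst_integrity_status states → Spec_worst_integrity_status states (worst_integrity_status states)

-- ===== LEMMAS AND PROOFS =====

-- presence of stripped label l among states
def pvQ (states : List String) (l : String) : Bool := states.any (fun s => PySem.Str.strip s == l)

set_option maxHeartbeats 1000000 in
theorem foldA_char (states : List String) (acc : Int × String) :
    states.foldl (fun (acc : Int × String) s =>
      let s' := PySem.Str.strip s
      match pvRank.get? s' with
      | none => acc
      | some i => if i < acc.1 then (i, s') else acc) acc =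
    (if pvQ states "error" ∧ 0 < acc.1 then ((0 : Int), "error")
     else if pvQ states "missing_and_corrupt" ∧ 1 < acc.1 then (1, "missing_and_corrupt")
     else if pvQ states "corrupt" ∧ 2 < acc.1 then (2, "corrupt")
     else if pvQ states "missing" ∧ 3 < acc.1 then (3, "missing")
     else if pvQ states "ok" ∧ 4 < acc.1 then (4, "ok")
     else acc) := by
  induction states generalizing acc with
  | nil => simp [pvQ]
  | cons s t ih =>
    simp only [List.foldl_cons, ih]
    clear ih
    have hq : ∀ l, pvQ (s :: t) l = ((PySem.Str.strip s == l) || pvQ t l) := by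
      intro l; simp [pvQ]
    simp only [hq]
    by_cases h0 : PySem.Str.strip s = "error"
    · simp only [h0, show pvRank.get? "error" = some 0 from by decide,
        show (("error":String) == "error") = true by decide,
        show (("error":String) == "missing_and_corrupt") = false by decide,
        show (("error":String) == "corrupt") = false by decide,
        show (("error":String) == "missing") = false by decide,
        show (("error":String) == "ok") = false by decide,
        Bool.true_or, Bool.false_or]
      generalize ("error":String) = e
      generalize ("missing_and_corrupt":String) = m
      generalize ("corrupt":String) = c
      generalize ("missing":String) = mi
      generalize ("ok":String) = o
      split_ifs <;> simp_all <;> omega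
    by_cases h1 : PySem.Str.strip s = "missing_and_corrupt"
    · simp only [h1, show pvRank.get? "missing_and_corrupt" = some 1 from by decide,
        show (("missing_and_corrupt":String) == "error") = false by decide,
        show (("missing_and_corrupt":String) == "missing_and_corrupt") = true by decide,
        show (("missing_and_corrupt":String) == "corrupt") = false by decide,
        show (("missing_and_corrupt":String) == "missing") = false by decide,
        show (("missing_and_corrupt":String) == "ok") = false by decide,
        Bool.true_or, Bool.false_or]
      clear h0
      generalize ("error":String) = e
      generalize ("missing_and_corrupt":String) = m
      generalize ("corrupt":String) = c
      generalize ("missing":String) = mi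
      generalize ("ok":String) = o
      split_ifs <;> simp_all <;> omega
    by_cases h2 : PySem.Str.strip s = "corrupt"
    · simp only [h2, show pvRank.get? "corrupt" = some 2 from by decide,
        show (("corrupt":String) == "error") = false by decide,
        show (("corrupt":String) == "missing_and_corrupt") = false by decide,
        show (("corrupt":String) == "corrupt") = true by decide,
        show (("corrupt":String) == "missing") = false by decide,
        show (("corrupt":String) == "ok") = false by decide,
        Bool.true_or, Bool.false_or]
      clear h0 h1
      generalize ("error":String) = e
      generalize ("missing_and_corrupt":String) = m
      generalize ("corrupt":String) = c
      generalize ("missing":String) = mi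
      generalize ("ok":String) = o
      split_ifs <;> simp_all <;> omega
    by_cases h3 : PySem.Str.strip s = "missing"
    · simp only [h3, show pvRank.get? "missing" = some 3 from by decide,
        show (("missing":String) == "error") = false by decide,
        show (("missing":String) == "missing_and_corrupt") = false by decide,
        show (("missing":String) == "corrupt") = false by decide,
        show (("missing":String) == "missing") = true by decide,
        show (("missing":String) == "ok") = false by decide,
        Bool.true_or, Bool.false_or]
      clear h0 h1 h2
      generalize ("error":String) = e
      generalize ("missing_and_corrupt":String) = m
      generalize ("corrupt":String) = c
      generalize ("missing":String) = mi
      generalize ("ok":String) = o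
      split_ifs <;> simp_all <;> omega
    by_cases h4 : PySem.Str.strip s = "ok"
    · simp only [h4, show pvRank.get? "ok" = some 4 from by decide,
        show (("ok":String) == "error") = false by decide,
        show (("ok":String) == "missing_and_corrupt") = false by decide,
        show (("ok":String) == "corrupt") = false by decide,
        show (("ok":String) == "missing") = false by decide,
        show (("ok":String) == "ok") = true by decide,
        Bool.true_or, Bool.false_or]
      clear h0 h1 h2 h3
      generalize ("error":String) = e
      generalize ("missing_and_corrupt":String) = m
      generalize ("corrupt":String) = c
      generalize ("missing":String) = mi
      generalize ("ok":String) = o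
      split_ifs <;> simp_all <;> omega
    · have hget : pvRank.get? (PySem.Str.strip s) = none := by
        have h : pvRank = PySem.Dict.mk
            [("error", 0), ("missing_and_corrupt", 1), ("corrupt", 2), ("missing", 3), ("ok", 4)] := by
          decide
        rw [h]
        simp [PySem.Dict.get?, beq_iff_eq,
          Ne.symm h0, Ne.symm h1, Ne.symm h2, Ne.symm h3, Ne.symm h4]
      simp only [hget,
        show (PySem.Str.strip s == "error") = false by simp [h0],
        show (PySem.Str.strip s == "missing_and_corrupt") = false by simp [h1],
        show (PySem.Str.strip s == "corrupt") = false by simp [h2],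
        show (PySem.Str.strip s == "missing") = false by simp [h3],
        show (PySem.Str.strip s == "ok") = false by simp [h4], Bool.false_or]

theorem pvQ_mem (states : List String) (l : String) :
    pvQ states l = (PySem.Set.contains (PySem.Set.ofList (states.map (fun s => PySem.Str.strip s))) l) := by
  rw [Bool.eq_iff_iff]
  simp only [pvQ, List.any_eq_true, beq_iff_eq]
  constructor
  · rintro ⟨s, hs, rfl⟩
    exact List.elem_eq_true_of_mem
      ((PySem.Set.mem_ofList _ _).mpr (List.mem_map.mpr ⟨s, hs, rfl⟩))
  · intro h
    obtain ⟨s, hs, hl⟩ :=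
      List.mem_map.mp ((PySem.Set.mem_ofList _ _).mp (List.mem_of_elem_eq_true h))
    exact ⟨s, hs, hl⟩

-- ===== VERDICT (by name: the statement is the Claim_ definition above) =====
theorem worst_integrity_status_spec : Claim_equal_worst_integrity_status := by
  intro states _
  unfold Spec_worst_integrity_status worst_integrity_status worst_integrity_status_alt
  rw [foldA_char]
  simp only [pvLabs, List.find?, ← pvQ_mem]
  by_cases h0 : pvQ states "error" <;> by_cases h1 : pvQ states "missing_and_corrupt" <;>
    by_cases h2 : pvQ states "corrupt" <;> by_cases h3 : pvQ states "missing" <;>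
    by_cases h4 : pvQ states "ok" <;> simp_all
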